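-- pv_equiv track=rewrite | github.com/AkeemAllen/pokemon-game-wiki-generator | routes_generator.py | get_encounter_table_columns
-- ===== SOURCE A (Python) =====
-- def get_encounter_table_columns(max_pokemon_on_single_route):
--     table_columns = ["Area", "Pokemon"]
--     if max_pokemon_on_single_route == 1:
--         return table_columns
--
--     for i in range(max_pokemon_on_single_route - 1):
--         if i < 5:
--             table_columns.append("&nbsp;")
--     return table_columns
-- ===== SOURCE B (Python) =====
-- def get_encounter_table_columns(max_pokemon_on_single_route):
--     count = max(0, min(max_pokemon_on_single_route - 1, 5))
--     return ["Area", "Pokemon"] + ["&nbsp;"] * count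
-- ===== Notes on version B (the rewrite author's own statement) =====
-- stated objective: simpler
-- what changed: Replaces the early return and the per-iteration 'i < 5' loop with a closed-form column count max(0, min(n-1, 5)) and list repetition.
import Mathlib
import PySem

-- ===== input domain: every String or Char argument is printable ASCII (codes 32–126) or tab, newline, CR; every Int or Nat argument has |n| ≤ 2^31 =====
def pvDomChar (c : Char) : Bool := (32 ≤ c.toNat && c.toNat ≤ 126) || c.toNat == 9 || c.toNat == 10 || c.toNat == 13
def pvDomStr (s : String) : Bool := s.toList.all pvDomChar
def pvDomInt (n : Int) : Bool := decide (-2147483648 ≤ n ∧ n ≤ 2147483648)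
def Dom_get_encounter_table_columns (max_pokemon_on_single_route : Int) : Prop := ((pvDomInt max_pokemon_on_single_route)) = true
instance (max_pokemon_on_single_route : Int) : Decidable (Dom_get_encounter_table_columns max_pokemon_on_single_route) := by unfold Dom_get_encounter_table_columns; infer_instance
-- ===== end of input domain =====

-- B replaces A's early return and bounded-append loop with a closed-form count max(0, min(n-1, 5)): simpler.


-- ===== PORT A =====
def get_encounter_table_columns (max_pokemon_on_single_route : Int) : List String :=
  let table_columns : List String := ["Area", "Pokemon"]
  if max_pokemon_on_single_route == 1 then table_columns
  else
    (PySem.List.pyRange 0 (max_pokemon_on_single_route - 1) 1).foldl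
      (fun acc i => if i < 5 then acc ++ ["&nbsp;"] else acc) table_columns

-- ===== PORT B =====
def get_encounter_table_columns_alt (max_pokemon_on_single_route : Int) : List String :=
  let count : Int := max 0 (min (max_pokemon_on_single_route - 1) 5)
  ["Area", "Pokemon"] ++ List.replicate count.toNat "&nbsp;"

-- ===== PRECONDITION & SPEC =====
def Spec_get_encounter_table_columns (max_pokemon_on_single_route : Int) (out : List String) : Prop := out = get_encounter_table_columns_alt max_pokemon_on_single_route
instance (max_pokemon_on_single_route : Int) (out : List String) : Decidable (Spec_get_encounter_table_columns max_pokemon_on_single_route out) := by unfold Spec_get_encounter_table_columns; infer_instance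

-- ===== CLAIM (what is proved, stated in full; the proofs are below) =====
def Claim_equal_get_encounter_table_columns : Prop := ∀ (max_pokemon_on_single_route : Int), Dom_get_encounter_table_columns max_pokemon_on_single_route → Spec_get_encounter_table_columns max_pokemon_on_single_route (get_encounter_table_columns max_pokemon_on_single_route)

-- ===== LEMMAS AND PROOFS =====
lemma foldl_range_nbsp (n : Nat) (base : List String) :
    (List.range n).foldl (fun (acc : List String) (k : Nat) => if (k : Int) < 5 then acc ++ ["&nbsp;"] else acc) base
      = base ++ List.replicate (min n 5) "&nbsp;" := by
  induction n with
  | zero => simp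
  | succ k ih =>
    rw [List.range_succ, List.foldl_append, ih]
    simp only [List.foldl]
    by_cases hk : (k : Int) < 5
    · have h5 : min (k + 1) 5 = min k 5 + 1 := by omega
      simp only [hk, if_pos, h5, List.replicate_succ', List.append_assoc]
    · have h5 : min (k + 1) 5 = min k 5 := by omega
      simp [hk, h5]

-- ===== VERDICT (by name: the statement is the Claim_ definition above) =====
theorem get_encounter_table_columns_spec : Claim_equal_get_encounter_table_columns := by
  intro m _
  unfold Spec_get_encounter_table_columns get_encounter_table_columns get_encounter_table_columns_alt
  by_cases h1 : m = 1
  · subst h1; simp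
  · have hbeq : (m == 1) = false := by simp [h1]
    simp only [hbeq, Bool.false_eq_true, if_false]
    rw [PySem.List.pyRange_one, List.foldl_map]
    have hzero : (m - 1 - 0) = m - 1 := by ring
    rw [hzero]
    have hf : (fun (x : List String) (y : Nat) => if (0 : Int) + (y : Int) < 5 then x ++ ["&nbsp;"] else x)
        = fun (acc : List String) (k : Nat) => if (k : Int) < 5 then acc ++ ["&nbsp;"] else acc := by
      funext x y; norm_num
    rw [hf, foldl_range_nbsp]
    have hn : min (m - 1).toNat 5 = (max 0 (min (m - 1) 5)).toNat := by omega
    rw [hn]
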